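-- pv_equiv track=rewrite | github.com/fabio-noga/reference-identification | useNames.py | check_phrases
-- ===== SOURCE A (Python) =====
-- def check_phrases(phrase, wordList):
--     characters_to_replace = [".", ";", ")", "(", ":", "-", "\"", ",", "'", "/"]
--     for char in characters_to_replace:
--         phrase = phrase.replace(char, "")
--     words = phrase.split(" ")
--
--     for i, word in enumerate(words):
--         if word in wordList:
--             if i != len(words)-1 and words[i+1] in wordList:
--                 return True
--     return False
-- ===== SOURCE B (Python) =====
-- def check_phrases(phrase, wordList):
--     # Single character-level pass: skip punctuation, cut words at spaces on the
--     # fly, and carry whether the previous word was a member; no replace/split.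
--     remove = set('.;)(:-",\'/')
--     members = set(wordList)
--     prev = False
--     buf = []
--     for c in phrase:
--         if c in remove:
--             continue
--         if c == ' ':
--             cur = ''.join(buf) in members
--             if prev and cur:
--                 return True
--             prev = cur
--             buf = []
--         else:
--             buf.append(c)
--     return prev and (''.join(buf) in members)
-- ===== Notes on version B (the rewrite author's own statement) =====
-- stated objective: alternative
-- what changed: B replaces A's staged pipeline (ten replace passes, a split, then an indexed loop with a words[i+1] lookahead) by one character-level state machine over the raw phrase that skips punctuation, cuts words at spaces on the fly, and carries a single boolean 'previous word was a member' flag, with wordList preloaded into a set.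
import Mathlib
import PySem

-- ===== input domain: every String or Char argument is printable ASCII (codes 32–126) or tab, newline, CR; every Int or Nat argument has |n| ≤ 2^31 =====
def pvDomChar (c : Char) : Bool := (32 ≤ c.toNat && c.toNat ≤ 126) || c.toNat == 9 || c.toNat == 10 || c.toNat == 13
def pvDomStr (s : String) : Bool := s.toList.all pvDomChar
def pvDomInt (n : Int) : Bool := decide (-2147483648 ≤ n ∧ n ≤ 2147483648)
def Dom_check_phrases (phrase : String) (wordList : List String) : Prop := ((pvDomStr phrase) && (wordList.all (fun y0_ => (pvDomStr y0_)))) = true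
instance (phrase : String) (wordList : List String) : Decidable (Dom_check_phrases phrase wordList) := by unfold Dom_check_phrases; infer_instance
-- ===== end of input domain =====

-- B replaces A's staged pipeline (ten replace passes, a split, an indexed loop with a
-- words[i+1] lookahead) by one character-level state machine over the raw phrase that skips
-- punctuation, cuts words at spaces, and carries a 'previous word was a member' flag;
-- objective: alternative decomposition (no speed claim).

-- ===== PORT A =====
-- A's 'for i, word in enumerate(words): …' loop with early return; 'words[i+1]' is
-- PySem.List.pyGet? (the 'i != len(words)-1' guard short-circuits exactly as in Python,
-- so the none case of the lookup is never reached on the guarded path).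
def pvLoopA (words wordList : List String) : List (Int × String) → Bool
  | [] => false
  | (i, word) :: rest =>
    if wordList.contains word then
      if decide (i ≠ (words.length : Int) - 1) &&
          ((PySem.List.pyGet? words (i + 1)).elim false (fun w2 => wordList.contains w2)) then
        true
      else pvLoopA words wordList rest
    else pvLoopA words wordList rest

def check_phrases (phrase : String) (wordList : List String) : Bool :=
  let characters_to_replace : List String := [".", ";", ")", "(", ":", "-", "\"", ",", "'", "/"]
  let phrase := characters_to_replace.foldl (fun p ch => PySem.Str.replace p ch "") phrase
  let words := (PySem.Str.split? phrase " ").getD []   -- phrase.split(" "), sep ≠ "" so never none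
  pvLoopA words wordList (PySem.List.enumerate words 0)

-- ===== PORT B =====
-- Source B's remove = set('.;)(:-",\'/') and members = set(wordList); the for-loop with its
-- early 'return True' is the structural recursion pvScanB over the phrase's characters,
-- with state (prev, buf) exactly as in the Python; ''.join(buf) is String.ofList.
def pvRemoveSet : PySem.Set Char := PySem.Set.ofList ['.', ';', ')', '(', ':', '-', '"', ',', '\'', '/']

def pvScanB (members : PySem.Set String) : List Char → Bool → List Char → Bool
  | [], prev, buf => prev && members.contains (String.ofList buf)
  | c :: rest, prev, buf =>
    if pvRemoveSet.contains c then pvScanB members rest prev buf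
    else if c == ' ' then
      let cur := members.contains (String.ofList buf)
      if prev && cur then true else pvScanB members rest cur []
    else pvScanB members rest prev (buf ++ [c])

def check_phrases_alt (phrase : String) (wordList : List String) : Bool :=
  pvScanB (PySem.Set.ofList wordList) phrase.toList false []

-- ===== PRECONDITION & SPEC =====
def Spec_check_phrases (phrase : String) (wordList : List String) (out : Bool) : Prop := out = check_phrases_alt phrase wordList
instance (phrase : String) (wordList : List String) (out : Bool) : Decidable (Spec_check_phrases phrase wordList out) := by unfold Spec_check_phrases; infer_instance

-- ===== CLAIM (what is proved, stated in full; the proofs are below) =====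
def Claim_equal_check_phrases : Prop := ∀ (phrase : String) (wordList : List String), Dom_check_phrases phrase wordList → Spec_check_phrases phrase wordList (check_phrases phrase wordList)

-- ===== LEMMAS AND PROOFS =====

def pvRemove : List Char := ['.', ';', ')', '(', ':', '-', '"', ',', '\'', '/']

-- single-character replace with "" is a character filter
theorem pv_replace_go_single (ch : Char) : ∀ (l acc : List Char) (fuel : Nat), l.length ≤ fuel →
    PySem.Chars.replace.go [ch] [] fuel l acc = acc.reverse ++ l.filter (fun c => !(c == ch)) := by
  intro l
  induction l with
  | nil =>
    intro acc fuel _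
    cases fuel <;> simp [PySem.Chars.replace.go]
  | cons c t ih =>
    intro acc fuel h
    cases fuel with
    | zero => simp at h
    | succ f =>
      have hf : t.length ≤ f := by simpa using h
      by_cases hc : ch = c
      · subst hc
        simp [PySem.Chars.replace.go, List.isPrefixOf, ih _ _ hf]
      · simp [PySem.Chars.replace.go, List.isPrefixOf, beq_iff_eq, hc, ih _ _ hf,
          Ne.symm hc]

theorem pv_replace_single (ch : Char) (l : List Char) :
    PySem.Chars.replace l [ch] [] = l.filter (fun c => !(c == ch)) := by
  simpa [PySem.Chars.replace] using pv_replace_go_single ch l [] l.length le_rfl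

-- a fold of single-character filters is one filter against the whole character list
theorem pv_clean_chars : ∀ (cs l : List Char),
    cs.foldl (fun p ch => p.filter (fun c => !(c == ch))) l
      = l.filter (fun c => !(cs.contains c)) := by
  intro cs
  induction cs with
  | nil => intro l; simp
  | cons ch cs ih =>
    intro l
    simp only [List.foldl_cons, ih, List.filter_filter]
    apply List.filter_congr
    intro c _
    by_cases hc : c = ch <;> simp [hc, Bool.and_comm]

-- A's ten replace passes produce exactly the punctuation-filtered character list
theorem pv_cleanA_toList (s : String) :
    (([".", ";", ")", "(", ":", "-", "\"", ",", "'", "/"] : List String).foldl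
        (fun p ch => PySem.Str.replace p ch "") s).toList
      = s.toList.filter (fun c => !(pvRemove.contains c)) := by
  have h := pv_clean_chars pvRemove s.toList
  simp only [pvRemove, List.foldl_cons, List.foldl_nil] at h ⊢
  rw [PySem.Str.toList_replace, PySem.Str.toList_replace, PySem.Str.toList_replace,
    PySem.Str.toList_replace, PySem.Str.toList_replace, PySem.Str.toList_replace,
    PySem.Str.toList_replace, PySem.Str.toList_replace, PySem.Str.toList_replace,
    PySem.Str.toList_replace]
  have e1 : ("." : String).toList = ['.'] := by decide
  have e2 : (";" : String).toList = [';'] := by decide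
  have e3 : (")" : String).toList = [')'] := by decide
  have e4 : ("(" : String).toList = ['('] := by decide
  have e5 : (":" : String).toList = [':'] := by decide
  have e6 : ("-" : String).toList = ['-'] := by decide
  have e7 : ("\"" : String).toList = ['"'] := by decide
  have e8 : ("," : String).toList = [','] := by decide
  have e9 : ("'" : String).toList = ['\''] := by decide
  have e10 : ("/" : String).toList = ['/'] := by decide
  have e0 : ("" : String).toList = [] := by decide
  rw [e1, e2, e3, e4, e5, e6, e7, e8, e9, e10, e0]
  simp only [pv_replace_single]
  exact h

-- structural specification of split-on-one-space (proof-side only)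
def pvSplitSp : List Char → List Char → List (List Char)
  | buf, [] => [buf]
  | buf, c :: r => if c = ' ' then buf :: pvSplitSp [] r else pvSplitSp (buf ++ [c]) r

theorem pvSplitSp_ne_nil (buf l : List Char) : pvSplitSp buf l ≠ [] := by
  cases l with
  | nil => simp [pvSplitSp]
  | cons c r =>
    by_cases hc : c = ' ' <;> simp [pvSplitSp, hc]
    exact pvSplitSp_ne_nil _ _

theorem pv_splitOn_go_spec : ∀ (l cur : List Char) (accs : List (List Char)) (fuel : Nat),
    l.length ≤ fuel →
    PySem.Chars.splitOn.go [' '] fuel l cur accs = accs.reverse ++ pvSplitSp cur.reverse l := by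
  intro l
  induction l with
  | nil =>
    intro cur accs fuel _
    cases fuel <;> simp [PySem.Chars.splitOn.go, pvSplitSp]
  | cons c r ih =>
    intro cur accs fuel h
    cases fuel with
    | zero => simp at h
    | succ f =>
      have hf : r.length ≤ f := by simpa using h
      by_cases hc : c = ' '
      · subst hc
        simp [PySem.Chars.splitOn.go, List.isPrefixOf, ih _ _ _ hf, pvSplitSp]
      · simp [PySem.Chars.splitOn.go, List.isPrefixOf, beq_iff_eq, Ne.symm hc, hc,
          ih _ _ _ hf, pvSplitSp]

theorem pv_splitOn_space (l : List Char) :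
    PySem.Chars.splitOn l [' '] = pvSplitSp [] l := by
  simpa [PySem.Chars.splitOn] using
    pv_splitOn_go_spec l [] [] (l.length + 1) (by omega)

-- adjacency of a boolean mask, structurally (the value A's loop computes)
def pvAdj : List Bool → Bool
  | a :: b :: r => (a && b) || pvAdj (b :: r)
  | _ => false

theorem pv_loopA_eq (ws wl : List String) : ∀ (l : List String) (j : Nat), ws.drop j = l →
    pvLoopA ws wl (PySem.List.enumerate l (j : Int))
      = pvAdj (l.map (fun w => wl.contains w)) := by
  intro l
  induction l with
  | nil => intro j _; simp [PySem.List.enumerate, pvLoopA, pvAdj]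
  | cons c t ih =>
    intro j h
    have hj : j < ws.length := by
      by_contra hle
      have : ws.drop j = [] := List.drop_eq_nil_of_le (by omega)
      simp [this] at h
    have ht : ws.drop (j + 1) = t := by
      rw [← List.tail_drop, h, List.tail_cons]
    rw [PySem.List.enumerate_cons]
    cases t with
    | nil =>
      have hlen : ws.length = j + 1 := by
        have h0 := congrArg List.length ht
        simp at h0
        omega
      have hg : (decide ((j : Int) ≠ (ws.length : Int) - 1)) = false := by
        have he : (j : Int) = (ws.length : Int) - 1 := by omega
        simp [he]
      simp [pvLoopA, hg, PySem.List.enumerate, pvAdj]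
    | cons c2 t2 =>
      have h2 : ws[j + 1]? = some c2 := by
        have h0 : (ws.drop (j + 1))[0]? = some c2 := by rw [ht]; rfl
        rw [List.getElem?_drop] at h0
        simpa using h0
      obtain ⟨hlen, hc2⟩ := List.getElem?_eq_some_iff.mp h2
      have hg : (decide ((j : Int) ≠ (ws.length : Int) - 1)) = true := by
        rw [decide_eq_true_eq]
        omega
      have hget : PySem.List.pyGet? ws ((j : Int) + 1) = some ws[j + 1] := by
        have : ((j : Int) + 1) = ((j + 1 : Nat) : Int) := by push_cast; ring
        rw [this, PySem.List.pyGet?_natCast]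
        exact List.getElem?_eq_getElem hlen
      have hrec := ih (j + 1) ht
      have hcast : ((j : Int) + 1) = ((j + 1 : Nat) : Int) := by push_cast; ring
      rw [hcast] at *
      simp only [pvLoopA, hg, hget, hc2, Option.elim, Bool.true_and]
      rw [hrec]
      by_cases hw : c ∈ wl <;> by_cases hw2 : c2 ∈ wl <;> simp [pvAdj, hw, hw2]

-- B's scan, with the punctuation-skip branch pre-applied as a filter
def pvScanB2 (mem : List Char → Bool) : List Char → Bool → List Char → Bool
  | [], prev, buf => prev && mem buf
  | c :: rest, prev, buf =>
    if c = ' ' then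
      if prev && mem buf then true else pvScanB2 mem rest (mem buf) []
    else pvScanB2 mem rest prev (buf ++ [c])

theorem pvRemoveSet_eq : pvRemoveSet = pvRemove := by decide

theorem pv_scanB_filter (members : PySem.Set String) : ∀ (l : List Char) (prev : Bool) (buf : List Char),
    pvScanB members l prev buf
      = pvScanB2 (fun b => members.contains (String.ofList b))
          (l.filter (fun c => !(pvRemove.contains c))) prev buf := by
  intro l
  induction l with
  | nil => intro prev buf; simp [pvScanB, pvScanB2]
  | cons c r ih =>
    intro prev buf
    by_cases hrm : c ∈ pvRemove
    · have hsp : ¬ (c = ' ') := by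
        intro hc; subst hc; revert hrm; decide
      simp [pvScanB, pvRemoveSet_eq, hrm, ih]
    · by_cases hc : c = ' '
      · subst hc
        simp only [pvScanB, pvRemoveSet_eq, PySem.Set.contains, List.contains_eq_mem,
          decide_eq_true_eq]
        rw [if_neg hrm]
        simp only [List.filter_cons, hrm, decide_false, Bool.not_false, if_true]
        by_cases hp : (prev && decide (String.ofList buf ∈ members)) = true <;>
          simp [pvScanB2, hp, ih, PySem.Set.contains, List.contains_eq_mem]
      · simp [pvScanB, pvRemoveSet_eq, hrm, hc, ih, pvScanB2]

-- the value of B's scan over the chunks of the remaining input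
def pvG (mem : List Char → Bool) : Bool → List (List Char) → Bool
  | _, [] => false
  | prev, [w] => prev && mem w
  | prev, w :: ws => if prev && mem w then true else pvG mem (mem w) ws

theorem pv_scanB2_eq_G (mem : List Char → Bool) : ∀ (l : List Char) (prev : Bool) (buf : List Char),
    pvScanB2 mem l prev buf = pvG mem prev (pvSplitSp buf l) := by
  intro l
  induction l with
  | nil => intro prev buf; simp [pvScanB2, pvSplitSp, pvG]
  | cons c r ih =>
    intro prev buf
    by_cases hc : c = ' '
    · subst hc
      obtain ⟨w, ws, hws⟩ : ∃ w ws, pvSplitSp ([] : List Char) r = w :: ws := by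
        cases hsp : pvSplitSp ([] : List Char) r with
        | nil => exact absurd hsp (pvSplitSp_ne_nil _ _)
        | cons w ws => exact ⟨w, ws, rfl⟩
      by_cases hp : prev && mem buf = true <;>
        simp [pvScanB2, pvSplitSp, hws, pvG, ih]
    · simp [pvScanB2, pvSplitSp, hc, ih]

theorem pv_G_eq_adj (mem : List Char → Bool) : ∀ (chunks : List (List Char)) (prev : Bool),
    chunks ≠ [] →
    pvG mem prev chunks
      = ((prev && mem (chunks.headI)) || pvAdj (chunks.map mem)) := by
  intro chunks
  induction chunks with
  | nil => intro prev h; exact absurd rfl h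
  | cons w ws ih =>
    intro prev _
    cases ws with
    | nil => simp [pvG, pvAdj]
    | cons w2 ws2 =>
      have hrec := ih (mem w) (by simp)
      by_cases hp : (prev && mem w) = true
      · simp only [pvG, hp, if_true, pvAdj, List.map_cons, List.headI]
        cases hm : mem w <;> cases hm2 : mem w2 <;> simp_all
      · simp [pvG, hp, hrec, pvAdj, List.headI]

theorem pv_set_contains (wl : List String) (s : String) :
    (PySem.Set.ofList wl).contains s = wl.contains s := by
  simp [PySem.Set.contains, List.contains_eq_mem, PySem.Set.mem_ofList]

-- ===== VERDICT (by name: the statement is the Claim_ definition above) =====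
theorem check_phrases_spec : Claim_equal_check_phrases := by
  intro phrase wordList _
  unfold Spec_check_phrases
  have hsplit : (PySem.Str.split?
      (([".", ";", ")", "(", ":", "-", "\"", ",", "'", "/"] : List String).foldl
        (fun p ch => PySem.Str.replace p ch "") phrase) " ").getD []
      = (pvSplitSp [] (phrase.toList.filter (fun c => !(pvRemove.contains c)))).map
          String.ofList := by
    have hsep : (" " : String).toList = [' '] := by decide
    simp only [PySem.Str.split?, PySem.Chars.split?, hsep, List.isEmpty_cons,
      Option.map_some, Option.getD_some, Bool.false_eq_true, if_false]
    rw [pv_cleanA_toList phrase, pv_splitOn_space]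
  -- both sides as pvAdj over the membership mask of the chunks of the cleaned characters
  have hA : check_phrases phrase wordList
      = pvAdj ((pvSplitSp [] (phrase.toList.filter (fun c => !(pvRemove.contains c)))).map
          (fun b => wordList.contains (String.ofList b))) := by
    show pvLoopA _ _ _ = _
    have hL := pv_loopA_eq
      ((PySem.Str.split?
        (([".", ";", ")", "(", ":", "-", "\"", ",", "'", "/"] : List String).foldl
          (fun p ch => PySem.Str.replace p ch "") phrase) " ").getD [])
      wordList _ 0 List.drop_zero
    rw [Nat.cast_zero] at hL
    rw [hL, hsplit, List.map_map]
    rfl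
  have hB : check_phrases_alt phrase wordList
      = pvAdj ((pvSplitSp [] (phrase.toList.filter (fun c => !(pvRemove.contains c)))).map
          (fun b => wordList.contains (String.ofList b))) := by
    show pvScanB _ _ _ _ = _
    rw [pv_scanB_filter, pv_scanB2_eq_G,
      pv_G_eq_adj _ _ false (pvSplitSp_ne_nil _ _)]
    simp only [Bool.false_and, Bool.false_or]
    exact congrArg pvAdj (List.map_congr_left
      (fun b _ => pv_set_contains wordList (String.ofList b)))
  rw [hA, hB]
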